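-- pv_equiv track=rewrite | github.com/rozoza/uob_fp | complete_sum.py | textReplace
-- ===== SOURCE A (Python) =====
-- def textReplace(text):
--     while '#38;'in text:
--         text = text.replace('#38;', '&')
--     while '~~#228;' in text:
--         text = text.replace('~~#228;', 'ä')
--     while '~~#163;' in text:
--         text = text.replace('~~#163;', '#')
--     while 'Subjectto' in text:
--         text = text.replace('Subjectto', 'Subject to')
--     while 'subjectto' in text:
--         text = text.replace('subjectto', 'subject to')
--     while 'Inaccordancewith' in text:
--         text = text.replace('Inaccordancewith', 'In accordance with')
--     while 'inaccordancewith' in text: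
--         text = text.replace('inaccordancewith', 'in accordance with')
--     while 'Bywayof' in text:
--         text = text.replace('Bywayof', 'By way of')
--     while 'bywayof' in text:
--         text = text.replace('bywayof', 'by way of')
--     while '~~#189;' in text:
--         text = text.replace('~~#189;', '1/2')
--     return text
-- ===== SOURCE B (Python) =====
-- _TAIL = [('Subjectto', 'Subject to'), ('subjectto', 'subject to'),
--          ('Inaccordancewith', 'In accordance with'),
--          ('inaccordancewith', 'in accordance with'),
--          ('Bywayof', 'By way of'), ('bywayof', 'by way of'),
--          ('~~#189;', '1/2')]
--
--
-- def _collapse163(text):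
--     # '~~#163;' -> '#' can recreate itself ('~~' + '#' + '163;'), so iterate to a fixpoint.
--     t = text.replace('~~#163;', '#')
--     return _collapse163(t) if '~~#163;' in t else t
--
--
-- def textReplace(text):
--     # For every rule except '~~#163;' one replace pass already removes all
--     # occurrences (no replacement can recreate its own pattern), so a single
--     # replace per rule suffices.
--     text = text.replace('#38;', '&').replace('~~#228;', 'ä')
--     text = _collapse163(text)
--     for pat, rep in _TAIL:
--         text = text.replace(pat, rep)
--     return text
-- ===== Notes on version B (the rewrite author's own statement) =====
-- stated objective: simpler
-- what changed: A runs a containment-test-then-replace fixpoint loop of full passes for each of the ten rules; B does a single replace pass per rule (proved sufficient because no replacement can recreate its own pattern) and keeps a recursive fixpoint only for the one rule whose replacement can recreate its own pattern.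
import Mathlib
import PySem

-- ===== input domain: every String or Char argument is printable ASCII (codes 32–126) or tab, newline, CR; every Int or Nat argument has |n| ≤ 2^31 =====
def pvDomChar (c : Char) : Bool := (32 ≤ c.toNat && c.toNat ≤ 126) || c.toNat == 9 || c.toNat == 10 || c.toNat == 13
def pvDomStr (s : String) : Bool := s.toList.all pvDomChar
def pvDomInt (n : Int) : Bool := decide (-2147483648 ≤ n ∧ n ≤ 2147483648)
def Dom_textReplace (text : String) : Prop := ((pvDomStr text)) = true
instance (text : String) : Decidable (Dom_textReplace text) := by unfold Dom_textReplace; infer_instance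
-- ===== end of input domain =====

-- B replaces A's ten fixpoint while-loops by a single replace pass per rule (proved
-- sufficient: no rule except '~~#163;'→'#' can recreate its own pattern) plus a recursive
-- fixpoint for that one self-recreating rule.

-- ===== PORT A =====
-- A's 'while pat in text: text = text.replace(pat, rep)'; the fuel argument is only a
-- totality guard (length+1 always exceeds the number of iterations Python performs).
def pvWhileReplace (pat rep : String) : Nat → String → String
  | 0, s => s
  | fuel + 1, s =>
      if PySem.Str.isIn pat s then pvWhileReplace pat rep fuel (PySem.Str.replace s pat rep)
      else s

def textReplace (text : String) : String :=
  let t1 := pvWhileReplace "#38;" "&" (text.toList.length + 1) text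
  let t2 := pvWhileReplace "~~#228;" "ä" (t1.toList.length + 1) t1
  let t3 := pvWhileReplace "~~#163;" "#" (t2.toList.length + 1) t2
  let t4 := pvWhileReplace "Subjectto" "Subject to" (t3.toList.length + 1) t3
  let t5 := pvWhileReplace "subjectto" "subject to" (t4.toList.length + 1) t4
  let t6 := pvWhileReplace "Inaccordancewith" "In accordance with" (t5.toList.length + 1) t5
  let t7 := pvWhileReplace "inaccordancewith" "in accordance with" (t6.toList.length + 1) t6
  let t8 := pvWhileReplace "Bywayof" "By way of" (t7.toList.length + 1) t7
  let t9 := pvWhileReplace "bywayof" "by way of" (t8.toList.length + 1) t8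
  let t10 := pvWhileReplace "~~#189;" "1/2" (t9.toList.length + 1) t9
  t10

-- ===== PORT B =====
-- Source B's _collapse163 (recursive fixpoint; the fuel argument is only a totality guard).
def pvCollapse163 : Nat → String → String
  | 0, s => PySem.Str.replace s "~~#163;" "#"
  | fuel + 1, s =>
      let t := PySem.Str.replace s "~~#163;" "#"
      if PySem.Str.isIn "~~#163;" t then pvCollapse163 fuel t else t

def pvTailRules : List (String × String) :=
  [("Subjectto", "Subject to"), ("subjectto", "subject to"),
   ("Inaccordancewith", "In accordance with"), ("inaccordancewith", "in accordance with"),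
   ("Bywayof", "By way of"), ("bywayof", "by way of"), ("~~#189;", "1/2")]

def pvReplaceEach : List (String × String) → String → String
  | [], s => s
  | (p, r) :: rest, s => pvReplaceEach rest (PySem.Str.replace s p r)

def textReplace_alt (text : String) : String :=
  let t := PySem.Str.replace (PySem.Str.replace text "#38;" "&") "~~#228;" "ä"
  let t2 := pvCollapse163 t.toList.length t
  pvReplaceEach pvTailRules t2

-- ===== PRECONDITION & SPEC =====
def Spec_textReplace (text : String) (out : String) : Prop := out = textReplace_alt text
instance (text : String) (out : String) : Decidable (Spec_textReplace text out) := by unfold Spec_textReplace; infer_instance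

-- ===== CLAIM (what is proved, stated in full; the proofs are below) =====
def Claim_equal_textReplace : Prop := ∀ (text : String), Dom_textReplace text → Spec_textReplace text (textReplace text)

-- ===== LEMMAS AND PROOFS =====

-- Proof-side model of Python's str.replace (replace all non-overlapping leftmost occurrences).
def pvRpl (old new : List Char) : List Char → List Char
  | [] => []
  | c :: t =>
      if h : old ≠ [] ∧ old.isPrefixOf (c :: t) = true then
        new ++ pvRpl old new ((c :: t).drop old.length)
      else c :: pvRpl old new t
termination_by l => l.length
decreasing_by
  · have : 0 < old.length := List.length_pos_iff.mpr h.1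
    simp [List.length_drop]; omega
  · simp

theorem pvGo_eq (old new : List Char) (hold : old ≠ []) :
    ∀ fuel l acc, l.length ≤ fuel →
      PySem.Chars.replace.go old new fuel l acc = acc.reverse ++ pvRpl old new l := by
  intro fuel
  induction fuel with
  | zero =>
      intro l acc hl
      have : l = [] := List.eq_nil_of_length_eq_zero (Nat.le_zero.mp hl)
      subst this
      simp [PySem.Chars.replace.go, pvRpl]
  | succ f ih =>
      intro l acc hl
      match l with
      | [] => simp [PySem.Chars.replace.go, pvRpl]
      | c :: t =>
          rw [PySem.Chars.replace.go]
          by_cases hp : old.isPrefixOf (c :: t) = true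
          · rw [if_pos hp]
            have h1 : 0 < old.length := List.length_pos_iff.mpr hold
            have hlen : ((c :: t).drop old.length).length ≤ f := by
              simp [List.length_drop] at *; omega
            rw [ih _ _ hlen, pvRpl, dif_pos ⟨hold, hp⟩]
            simp
          · rw [if_neg hp]
            have hlen : t.length ≤ f := by simp at hl; omega
            rw [ih _ _ hlen, pvRpl, dif_neg (by simp [hp])]
            simp

theorem pvReplace_eq_rpl (old new : List Char) (hold : old ≠ []) (s : List Char) :
    PySem.Chars.replace s old new = pvRpl old new s := by
  rw [PySem.Chars.replace, if_neg (by simp [hold]),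
    pvGo_eq old new hold s.length s [] le_rfl]
  simp

theorem pvRpl_noop (old new : List Char) :
    ∀ l, ¬ old <:+: l → pvRpl old new l = l := by
  intro l
  induction l using pvRpl.induct old with
  | case1 => intro _; simp [pvRpl]
  | case2 c t hcond ih =>
      intro h
      exact absurd ((List.isPrefixOf_iff_prefix.mp hcond.2).isInfix) h
  | case3 c t hcond ih =>
      intro h
      rw [pvRpl, dif_neg hcond, ih (fun hi => h (List.infix_cons hi))]

theorem pvPrefix_append_cases {α : Type} (x a b : List α) (h : x <+: a ++ b) :
    x <+: a ∨ (a <+: x ∧ x.drop a.length <+: b) := by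
  by_cases hl : x.length ≤ a.length
  · left
    have hx := List.prefix_iff_eq_take.mp h
    rw [List.take_append_of_le_length hl] at hx
    rw [hx]; exact List.take_prefix _ _
  · right
    push Not at hl
    have hx := List.prefix_iff_eq_take.mp h
    constructor
    · apply List.prefix_iff_eq_take.mpr
      rw [hx, List.take_take, min_eq_left (le_of_lt hl),
        List.take_append_of_le_length le_rfl, List.take_length]
    · apply List.prefix_iff_eq_take.mpr
      rw [hx, List.drop_take, List.drop_append_of_le_length le_rfl]
      simp

theorem pvInfix_drop {α : Type} (p l : List α) (i : Nat) (h : p <+: l.drop i) : p <:+: l :=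
  h.isInfix.trans (l.drop_suffix i).isInfix

theorem pvInfix_append_cases {α : Type} (p a b : List α) (h : p <:+: a ++ b) :
    p <:+: a ∨ p <:+: b ∨
      ∃ k, 1 ≤ k ∧ k < p.length ∧ p.take k <:+ a ∧ p.drop k <+: b := by
  obtain ⟨s, u, hsu⟩ := h
  have hpref : p <+: (a ++ b).drop s.length := by
    rw [← hsu]; simp
  by_cases hi : a.length ≤ s.length
  · right; left
    rw [List.drop_append, List.drop_eq_nil_of_le hi, List.nil_append] at hpref
    exact pvInfix_drop _ _ _ hpref
  · push Not at hi
    rw [List.drop_append, Nat.sub_eq_zero_of_le (le_of_lt hi), List.drop_zero] at hpref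
    rcases pvPrefix_append_cases _ _ _ hpref with hc | ⟨hda, hdb⟩
    · left; exact pvInfix_drop _ _ _ hc
    · set k := (a.drop s.length).length with hk
      have hk1 : 1 ≤ k := by simp [hk]; omega
      have hklen : k ≤ p.length := hda.length_le
      by_cases hkp : k < p.length
      · right; right
        refine ⟨k, hk1, hkp, ?_, hdb⟩
        have hteq : p.take k = a.drop s.length := by
          have h2 := List.prefix_iff_eq_take.mp hda
          rw [← h2]
        rw [hteq]; exact a.drop_suffix s.length
      · left
        have hkeq : k = p.length := by omega
        have hpe : p = a.drop s.length := by
          have h2 := List.prefix_iff_eq_take.mp hda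
          rw [← hk, hkeq, List.take_length] at h2
          exact h2.symm
        rw [hpe]
        exact (a.drop_suffix s.length).isInfix

theorem pvRpl_tail_prefix (old new : List Char)
    (hA : ∀ j, j < old.length → 1 ≤ j →
      ¬ old.drop j <+: new ∧ ¬ new <+: old.drop j) :
    ∀ l, ∀ j, 1 ≤ j → j < old.length → old.drop j <+: pvRpl old new l → old.drop j <+: l := by
  intro l
  induction l using pvRpl.induct old with
  | case1 =>
      intro j h1 h2 hp
      simp [pvRpl] at hp
      omega
  | case2 c t hcond ih =>
      intro j h1 h2 hp
      rw [pvRpl, dif_pos hcond] at hp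
      rcases pvPrefix_append_cases _ _ _ hp with hc | ⟨hc, _⟩
      · exact absurd hc (hA j h2 h1).1
      · exact absurd hc (hA j h2 h1).2
  | case3 c t hcond ih =>
      intro j h1 h2 hp
      rw [pvRpl, dif_neg hcond] at hp
      rw [List.drop_eq_getElem_cons h2, List.cons_prefix_cons] at hp
      obtain ⟨hc, hp'⟩ := hp
      by_cases hj : j + 1 < old.length
      · have := ih (j + 1) (by omega) hj hp'
        rw [List.drop_eq_getElem_cons h2, hc]
        exact List.cons_prefix_cons.mpr ⟨rfl, this⟩
      · have hnil : old.drop (j + 1) = [] := List.drop_eq_nil_of_le (by omega)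
        rw [List.drop_eq_getElem_cons h2, hnil, hc]
        exact List.cons_prefix_cons.mpr ⟨rfl, List.nil_prefix⟩

theorem pvRpl_noOcc (old new : List Char) (hold : old ≠ []) (hm : 2 ≤ old.length)
    (hA : ∀ j, j < old.length → 1 ≤ j →
      ¬ old.drop j <+: new ∧ ¬ new <+: old.drop j)
    (hC : ¬ old <:+: new)
    (hD : ∀ k, k < old.length → 1 ≤ k → ¬ old.take k <:+ new) :
    ∀ l, ¬ old <:+: pvRpl old new l := by
  intro l
  induction l using pvRpl.induct old with
  | case1 =>
      intro h
      simp [pvRpl] at h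
      exact hold h
  | case2 c t hcond ih =>
      intro h
      rw [pvRpl, dif_pos hcond] at h
      rcases pvInfix_append_cases _ _ _ h with hc | hc | ⟨k, hk1, hk2, hta, _⟩
      · exact hC hc
      · exact ih hc
      · exact (hD k hk2 hk1) hta
  | case3 c t hcond ih =>
      intro h
      rw [pvRpl, dif_neg hcond] at h
      rcases List.infix_cons_iff.mp h with hp | hi
      · have h0 : 0 < old.length := by omega
        have hdecomp : old = old[0] :: old.drop 1 := by
          have := List.drop_eq_getElem_cons h0 (l := old)
          simpa using this
        nth_rewrite 1 [hdecomp] at hp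
        rw [List.cons_prefix_cons] at hp
        obtain ⟨hc0, hp'⟩ := hp
        have htail := pvRpl_tail_prefix old new hA t 1 le_rfl (by omega) hp'
        have : old <+: c :: t := by
          nth_rewrite 1 [hdecomp]
          rw [hc0]
          exact List.cons_prefix_cons.mpr ⟨rfl, htail⟩
        exact hcond ⟨hold, List.isPrefixOf_iff_prefix.mpr this⟩
      · exact ih hi

theorem pvReplace_noop (pat rep s : String) (hold : pat.toList ≠ [])
    (h : PySem.Str.isIn pat s = false) : PySem.Str.replace s pat rep = s := by
  rw [PySem.Str.isIn_eq] at h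
  rw [PySem.Str.replace, pvReplace_eq_rpl _ _ hold,
    pvRpl_noop _ _ _ ((PySem.Chars.isIn_eq_false_iff _ _).mp h),
    String.ofList_toList]

theorem pvReplace_noOcc (pat rep : String) (hold : pat.toList ≠ []) (hm : 2 ≤ pat.toList.length)
    (hA : ∀ j, j < pat.toList.length → 1 ≤ j →
      ¬ pat.toList.drop j <+: rep.toList ∧ ¬ rep.toList <+: pat.toList.drop j)
    (hC : ¬ pat.toList <:+: rep.toList)
    (hD : ∀ k, k < pat.toList.length → 1 ≤ k → ¬ pat.toList.take k <:+ rep.toList)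
    (s : String) : PySem.Str.isIn pat (PySem.Str.replace s pat rep) = false := by
  rw [PySem.Str.replace, PySem.Str.isIn_eq, String.toList_ofList,
    pvReplace_eq_rpl _ _ hold]
  exact (PySem.Chars.isIn_eq_false_iff _ _).mpr (pvRpl_noOcc _ _ hold hm hA hC hD _)

theorem pvStage_eq (pat rep : String) (hold : pat.toList ≠ []) (hm : 2 ≤ pat.toList.length)
    (hA : ∀ j, j < pat.toList.length → 1 ≤ j →
      ¬ pat.toList.drop j <+: rep.toList ∧ ¬ rep.toList <+: pat.toList.drop j)
    (hC : ¬ pat.toList <:+: rep.toList)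
    (hD : ∀ k, k < pat.toList.length → 1 ≤ k → ¬ pat.toList.take k <:+ rep.toList)
    (n : Nat) (s : String) :
    pvWhileReplace pat rep (n + 1) s = PySem.Str.replace s pat rep := by
  rw [pvWhileReplace]
  by_cases hin : PySem.Str.isIn pat s = true
  · rw [if_pos hin]
    have hno := pvReplace_noOcc pat rep hold hm hA hC hD s
    cases n with
    | zero => rfl
    | succ k => rw [pvWhileReplace, if_neg (by rw [hno]; simp)]
  · rw [if_neg hin]
    exact (pvReplace_noop pat rep s hold (Bool.eq_false_iff.mpr hin)).symm

theorem pvCollapse163_noop (f : Nat) (s : String)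
    (h : PySem.Str.isIn "~~#163;" s = false) : pvCollapse163 f s = s := by
  have hrw := pvReplace_noop "~~#163;" "#" s (by decide) h
  cases f with
  | zero => rw [pvCollapse163, hrw]
  | succ g =>
      show (if PySem.Str.isIn "~~#163;" (PySem.Str.replace s "~~#163;" "#") = true
          then pvCollapse163 g (PySem.Str.replace s "~~#163;" "#")
          else PySem.Str.replace s "~~#163;" "#") = s
      rw [hrw, if_neg (by rw [h]; simp)]

theorem pvCollapse_eq_while (f : Nat) (s : String) :
    pvCollapse163 f s = pvWhileReplace "~~#163;" "#" (f + 1) s := by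
  induction f generalizing s with
  | zero =>
      rw [pvCollapse163, pvWhileReplace]
      by_cases hin : PySem.Str.isIn "~~#163;" s = true
      · rw [if_pos hin]; rfl
      · rw [if_neg hin]
        exact pvReplace_noop "~~#163;" "#" s (by decide) (Bool.eq_false_iff.mpr hin)
  | succ g ih =>
      show (if PySem.Str.isIn "~~#163;" (PySem.Str.replace s "~~#163;" "#") = true
          then pvCollapse163 g (PySem.Str.replace s "~~#163;" "#")
          else PySem.Str.replace s "~~#163;" "#")
        = if PySem.Str.isIn "~~#163;" s = true
          then pvWhileReplace "~~#163;" "#" (g + 1) (PySem.Str.replace s "~~#163;" "#")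
          else s
      by_cases hin : PySem.Str.isIn "~~#163;" s = true
      · rw [if_pos hin, ← ih]
        by_cases hin2 : PySem.Str.isIn "~~#163;" (PySem.Str.replace s "~~#163;" "#") = true
        · rw [if_pos hin2]
        · rw [if_neg hin2]
          exact (pvCollapse163_noop g _ (Bool.eq_false_iff.mpr hin2)).symm
      · have hb : PySem.Str.isIn "~~#163;" s = false := Bool.eq_false_iff.mpr hin
        have hrw := pvReplace_noop "~~#163;" "#" s (by decide) hb
        rw [if_neg hin, hrw, if_neg hin]

-- ===== VERDICT (by name: the statement is the Claim_ definition above) =====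
theorem textReplace_spec : Claim_equal_textReplace := by
  intro text _
  show textReplace text = textReplace_alt text
  simp only [textReplace, textReplace_alt, pvReplaceEach, pvTailRules]
  rw [pvStage_eq "#38;" "&" (by decide) (by decide) (by decide) (by decide) (by decide),
    pvStage_eq "~~#228;" "ä" (by decide) (by decide) (by decide) (by decide) (by decide),
    pvCollapse_eq_while,
    pvStage_eq "Subjectto" "Subject to" (by decide) (by decide) (by decide) (by decide) (by decide),
    pvStage_eq "subjectto" "subject to" (by decide) (by decide) (by decide) (by decide) (by decide),
    pvStage_eq "Inaccordancewith" "In accordance with" (by decide) (by decide) (by decide) (by decide) (by decide),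
    pvStage_eq "inaccordancewith" "in accordance with" (by decide) (by decide) (by decide) (by decide) (by decide),
    pvStage_eq "Bywayof" "By way of" (by decide) (by decide) (by decide) (by decide) (by decide),
    pvStage_eq "bywayof" "by way of" (by decide) (by decide) (by decide) (by decide) (by decide),
    pvStage_eq "~~#189;" "1/2" (by decide) (by decide) (by decide) (by decide) (by decide)]
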